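-- pv_equiv track=rewrite | github.com/olivermarroquin/ai-factory | tools/operator/generate_snapshot.py | _normalize_header
-- ===== SOURCE A (Python) =====
-- def _normalize_header(line):
--     stripped = line.lstrip()
--     if not stripped.startswith("#"):
--         return None
--     level = 0
--     for ch in stripped:
--         if ch == "#":
--             level += 1
--         else:
--             break
--     if level == 1 or level > 3:
--         return None
--     if stripped[level:level + 1] != " ":
--         return None
--     text = stripped[level:].strip()
--     return text.lower() if text else None
-- ===== SOURCE B (Python) =====
-- def _text_or_none(body):
--     text = body.strip().lower()
--     return text or None
--
--
-- def _normalize_header(line):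
--     s = line.lstrip()
--     if s.startswith("## "):
--         return _text_or_none(s[3:])
--     if s.startswith("### "):
--         return _text_or_none(s[4:])
--     return None
-- ===== Notes on version B (the rewrite author's own statement) =====
-- stated objective: simpler
-- what changed: B replaces A's manual leading-'#' counting loop, level-range check and next-character slice test by two direct prefix tests ('## ' / '### ') on the left-stripped line.
import Mathlib
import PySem

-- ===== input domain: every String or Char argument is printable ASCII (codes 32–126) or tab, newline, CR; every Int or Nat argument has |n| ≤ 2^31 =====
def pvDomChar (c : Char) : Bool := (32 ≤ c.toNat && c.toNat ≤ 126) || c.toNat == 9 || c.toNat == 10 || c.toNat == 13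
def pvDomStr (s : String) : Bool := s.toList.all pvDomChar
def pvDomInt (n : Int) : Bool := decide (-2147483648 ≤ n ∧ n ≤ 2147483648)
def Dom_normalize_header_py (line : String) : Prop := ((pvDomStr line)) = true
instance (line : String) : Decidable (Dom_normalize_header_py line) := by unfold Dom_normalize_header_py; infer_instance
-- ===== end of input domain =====

-- B replaces A's manual '#'-counting loop and level/next-char checks by two direct
-- prefix tests ("## " / "### ") on the left-stripped line (objective: simpler).

-- ===== PORT A =====
-- the 'for ch in stripped: if ch == "#": level += 1 else: break' loop of A
def pvLevelLoop : List Char → Nat → Nat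
  | [], level => level
  | c :: rest, level => if c = '#' then pvLevelLoop rest (level + 1) else level

-- body of A applied to 'stripped = line.lstrip()'
def pvABody (stripped : String) : Option String :=
  if !(PySem.Str.startswith stripped "#") then none
  else
    let level := pvLevelLoop stripped.toList 0
    if level = 1 ∨ level > 3 then none
    else if PySem.Str.slice stripped (some (level : Int)) (some ((level : Int) + 1)) ≠ " " then none
    else
      let text := PySem.Str.strip (PySem.Str.slice stripped (some (level : Int)) none)
      if text ≠ "" then some (PySem.Str.lower text) else none

def normalize_header_py (line : String) : Option String :=
  pvABody (PySem.Str.lstrip line)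

-- ===== PORT B =====
-- helper _text_or_none of Source B
def pvTextOrNone (body : String) : Option String :=
  let text := PySem.Str.lower (PySem.Str.strip body)
  if text ≠ "" then some text else none

-- body of B applied to 's = line.lstrip()'
def pvBBody (s : String) : Option String :=
  if PySem.Str.startswith s "## " then pvTextOrNone (PySem.Str.slice s (some 3) none)
  else if PySem.Str.startswith s "### " then pvTextOrNone (PySem.Str.slice s (some 4) none)
  else none

def normalize_header_py_alt (line : String) : Option String :=
  pvBBody (PySem.Str.lstrip line)

-- ===== PRECONDITION & SPEC =====
def Spec_normalize_header_py (line : String) (out : Option String) : Prop := out = normalize_header_py_alt line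
instance (line : String) (out : Option String) : Decidable (Spec_normalize_header_py line out) := by unfold Spec_normalize_header_py; infer_instance

-- ===== CLAIM (what is proved, stated in full; the proofs are below) =====
def Claim_equal_normalize_header_py : Prop := ∀ (line : String), Dom_normalize_header_py line → Spec_normalize_header_py line (normalize_header_py line)

-- ===== LEMMAS AND PROOFS =====

-- String equality through toList
theorem pvStrEqIff (s t : String) : s = t ↔ s.toList = t.toList :=
  ⟨congrArg _, String.ext⟩

-- list-level cores of the two bodies
def pvCoreTextOrNone (body : List Char) : Option String :=
  let text := PySem.Chars.lower (PySem.Chars.strip body)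
  if text ≠ [] then some (String.ofList text) else none

def pvCoreA (l : List Char) : Option String :=
  if !(PySem.Chars.startswith l ['#']) then none
  else
    let level := pvLevelLoop l 0
    if level = 1 ∨ level > 3 then none
    else if PySem.Chars.slice l (some (level : Int)) (some ((level : Int) + 1)) ≠ [' '] then none
    else
      let text := PySem.Chars.strip (PySem.Chars.slice l (some (level : Int)) none)
      if text ≠ [] then some (String.ofList (PySem.Chars.lower text)) else none

def pvCoreB (l : List Char) : Option String :=
  if PySem.Chars.startswith l ['#', '#', ' '] then pvCoreTextOrNone (PySem.Chars.slice l (some 3) none)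
  else if PySem.Chars.startswith l ['#', '#', '#', ' '] then pvCoreTextOrNone (PySem.Chars.slice l (some 4) none)
  else none

theorem pvLowerOfList (t : String) : PySem.Str.lower t = String.ofList (PySem.Chars.lower t.toList) :=
  String.ext (by simp)

theorem pvABody_eq_core (st : String) : pvABody st = pvCoreA st.toList := by
  have hs : ("#" : String).toList = ['#'] := by decide
  have hsp : (" " : String).toList = [' '] := by decide
  have hnil : ("" : String).toList = [] := by decide
  simp only [pvABody, pvCoreA, PySem.Str.startswith_eq, hs, hsp, hnil, ne_eq, pvStrEqIff,
    pvLowerOfList, PySem.Str.toList_slice, PySem.Str.toList_strip]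

theorem pvBBody_eq_core (st : String) : pvBBody st = pvCoreB st.toList := by
  have h2 : ("## " : String).toList = ['#', '#', ' '] := by decide
  have h3 : ("### " : String).toList = ['#', '#', '#', ' '] := by decide
  have hnil : ("" : String).toList = [] := by decide
  simp only [pvBBody, pvCoreB, pvTextOrNone, pvCoreTextOrNone, PySem.Str.startswith_eq, h2, h3,
    hnil, ne_eq, pvStrEqIff, pvLowerOfList, PySem.Str.toList_slice, PySem.Str.toList_strip,
    String.toList_ofList]

theorem pvLevelLoop_le (l : List Char) (k : Nat) : k ≤ pvLevelLoop l k := by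
  induction l generalizing k with
  | nil => simp [pvLevelLoop]
  | cons c rest ih =>
    simp only [pvLevelLoop]
    split
    · exact le_trans (Nat.le_succ k) (ih (k + 1))
    · exact le_refl k

theorem pvLevelLoop_hash (l : List Char) (k : Nat) : pvLevelLoop ('#' :: l) k = pvLevelLoop l (k + 1) := by
  simp [pvLevelLoop]

theorem pvStripSpace (l : List Char) : PySem.Chars.strip (' ' :: l) = PySem.Chars.strip l := by
  have h : PySem.Chars.isspace ' ' = true := by decide
  simp [PySem.Chars.strip, PySem.Chars.lstrip, h]

theorem pvLowerNil (x : List Char) : PySem.Chars.lower x = [] ↔ x = [] := by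
  simp [PySem.Chars.lower]

theorem pvCore_eq (l : List Char) : pvCoreA l = pvCoreB l := by
  rcases l with _ | ⟨a, l1⟩
  · rfl
  by_cases ha : a = '#'
  swap
  · simp [pvCoreA, pvCoreB, PySem.Chars.startswith, List.isPrefixOf, Ne.symm ha]
  subst ha
  rcases l1 with _ | ⟨b, l2⟩
  · rfl
  by_cases hb : b = '#'
  swap
  · have hlev : pvLevelLoop ('#' :: b :: l2) 0 = 1 := by simp [pvLevelLoop, hb]
    simp [pvCoreA, pvCoreB, hlev, PySem.Chars.startswith, List.isPrefixOf, Ne.symm hb]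
  subst hb
  rcases l2 with _ | ⟨c, r⟩
  · rfl
  by_cases hc : c = '#'
  swap
  · have hlev : pvLevelLoop ('#' :: '#' :: c :: r) 0 = 2 := by simp [pvLevelLoop, hc]
    have e1 : PySem.List.slice ('#' :: '#' :: c :: r) (some ((2 : Nat) : Int))
        (some ((3 : Nat) : Int)) = [c] := by rw [PySem.List.slice_natCast]; simp
    have e2 : PySem.List.slice ('#' :: '#' :: c :: r) (some ((2 : Nat) : Int)) none =
        c :: r := by rw [PySem.List.slice_from_natCast]; simp
    have e3 : PySem.List.slice ('#' :: '#' :: c :: r) (some ((3 : Nat) : Int)) none =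
        r := by rw [PySem.List.slice_from_natCast]; simp
    simp only [Nat.cast_ofNat] at e1 e2 e3
    by_cases hsp : c = ' '
    · subst hsp
      simp [pvCoreA, pvCoreB, pvCoreTextOrNone, hlev, PySem.Chars.startswith, List.isPrefixOf,
        e1, e2, e3, pvStripSpace, pvLowerNil]
    · simp [pvCoreA, pvCoreB, hlev, PySem.Chars.startswith, List.isPrefixOf, e1,
        hsp, Ne.symm hsp, Ne.symm hc]
  subst hc
  rcases r with _ | ⟨d, r'⟩
  · rfl
  by_cases hd : d = '#'
  swap
  · have hlev : pvLevelLoop ('#' :: '#' :: '#' :: d :: r') 0 = 3 := by simp [pvLevelLoop, hd]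
    have e1 : PySem.List.slice ('#' :: '#' :: '#' :: d :: r') (some ((3 : Nat) : Int))
        (some ((4 : Nat) : Int)) = [d] := by rw [PySem.List.slice_natCast]; simp
    have e2 : PySem.List.slice ('#' :: '#' :: '#' :: d :: r') (some ((3 : Nat) : Int)) none =
        d :: r' := by rw [PySem.List.slice_from_natCast]; simp
    have e3 : PySem.List.slice ('#' :: '#' :: '#' :: d :: r') (some ((4 : Nat) : Int)) none =
        r' := by rw [PySem.List.slice_from_natCast]; simp
    simp only [Nat.cast_ofNat] at e1 e2 e3
    by_cases hsp : d = ' '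
    · subst hsp
      simp [pvCoreA, pvCoreB, pvCoreTextOrNone, hlev, PySem.Chars.startswith, List.isPrefixOf,
        e1, e2, e3, pvStripSpace, pvLowerNil]
    · simp [pvCoreA, pvCoreB, hlev, PySem.Chars.startswith, List.isPrefixOf, e1,
        hsp, Ne.symm hsp]
  subst hd
  have h4 : 4 ≤ pvLevelLoop ('#' :: '#' :: '#' :: '#' :: r') 0 := by
    rw [pvLevelLoop_hash, pvLevelLoop_hash, pvLevelLoop_hash, pvLevelLoop_hash]
    exact pvLevelLoop_le r' 4
  have hlev : pvLevelLoop ('#' :: '#' :: '#' :: '#' :: r') 0 = 1 ∨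
      pvLevelLoop ('#' :: '#' :: '#' :: '#' :: r') 0 > 3 := Or.inr (by omega)
  simp [pvCoreA, pvCoreB, hlev, PySem.Chars.startswith, List.isPrefixOf]

theorem pvBodies_eq (st : String) : pvABody st = pvBBody st := by
  rw [pvABody_eq_core, pvBBody_eq_core, pvCore_eq]

-- ===== VERDICT (by name: the statement is the Claim_ definition above) =====
theorem normalize_header_py_spec : Claim_equal_normalize_header_py := by
  intro line _
  unfold Spec_normalize_header_py normalize_header_py normalize_header_py_alt
  exact pvBodies_eq _
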